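-- pv_equiv track=rewrite | github.com/mpettersson/PythonReview | questions/list_and_recursion/sudoku_validator.py | is_partial_sudoku_valid_via_list_and_set_min
-- ===== SOURCE A (Python) =====
-- def is_partial_sudoku_valid_via_list_and_set_min(m):
--     if isinstance(m, list) and len(m) == 9 and all([len(row) == 9 for row in m]):
--         seen = sum(([(val, r), (c, val), (r//3, c//3, val)]     # Use sum to concatenate lists of tuples.
--                     for r, row_vals in enumerate(m)             # r = row index, row_vals = list (of values)
--                     for c, val in enumerate(row_vals)           # c = col index, val = actual sudoku cell value,
--                     if 49 <= ord(val) <= 57), [])               # IFF val was a char in range '1'-'9' (else no tuples).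
--         return len(seen) == len(set(seen))                      # Compare built list size to set(built list) size.
--     return False
-- ===== SOURCE B (Python) =====
-- def is_partial_sudoku_valid_via_list_and_set_min(m):
--     if not (isinstance(m, list) and len(m) == 9 and all(len(row) == 9 for row in m)):
--         return False
--     # Collect the digit cells once, then brute-force check every PAIR of cells
--     # for a direct sudoku conflict (same value in the same row, column or box).
--     # No key tuples, no sets, no hashing: duplicate detection is pairwise comparison.
--     cells = [(r, c, v)
--              for r, row in enumerate(m)
--              for c, v in enumerate(row)
--              if 49 <= ord(v) <= 57]
--     ok = True
--     for i, (r1, c1, v1) in enumerate(cells):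
--         for r2, c2, v2 in cells[i + 1:]:
--             if v1 == v2 and (r1 == r2 or c1 == c2 or
--                              (r1 // 3 == r2 // 3 and c1 // 3 == c2 // 3)):
--                 ok = False
--     return ok
-- ===== Notes on version B (the rewrite author's own statement) =====
-- stated objective: alternative
-- what changed: A emits three key tuples per digit cell into one concatenated list and compares its length with its set's size; B builds no keys and no set at all: it collects the digit cells and checks every pair of cells directly for a same-value row/column/box conflict.
import Mathlib
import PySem

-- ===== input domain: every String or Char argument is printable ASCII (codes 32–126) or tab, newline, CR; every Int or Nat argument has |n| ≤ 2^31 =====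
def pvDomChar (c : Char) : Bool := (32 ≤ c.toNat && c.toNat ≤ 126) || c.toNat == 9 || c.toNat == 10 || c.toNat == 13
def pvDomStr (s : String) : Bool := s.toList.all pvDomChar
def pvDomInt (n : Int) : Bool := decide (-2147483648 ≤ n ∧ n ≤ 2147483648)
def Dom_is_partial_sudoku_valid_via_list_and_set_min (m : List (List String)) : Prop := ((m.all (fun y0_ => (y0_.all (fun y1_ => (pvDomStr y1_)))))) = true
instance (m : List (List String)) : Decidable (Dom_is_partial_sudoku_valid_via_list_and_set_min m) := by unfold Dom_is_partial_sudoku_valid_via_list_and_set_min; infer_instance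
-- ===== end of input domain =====

-- B replaces A's "emit three key tuples per digit cell, concatenate them all, compare
-- list length with set size" by a keyless, setless pairwise scan: collect the digit
-- cells once and compare every pair of cells directly for a same-value row/column/box
-- conflict (objective: alternative algorithm). Neither side mutates m.

-- ===== PORT A =====
-- Python mixes tuples of three distinct shapes in one list; tuples of different shapes are never
-- equal in Python, which this sum type models exactly.
inductive SKey
  | rv : String → Int → SKey            -- (val, r)
  | cv : Int → String → SKey            -- (c, val)
  | bx : Int → Int → String → SKey      -- (r//3, c//3, val)
deriving DecidableEq, Repr

-- ord(val): exact when val is a single character; on any other string Python raises TypeError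
-- (those inputs are excluded by Pre_), the -1 there is an arbitrary out-of-range value.
def pyOrd (s : String) : Int :=
  match s.toList with
  | [c] => (c.toNat : Int)
  | _ => -1

def is_partial_sudoku_valid_via_list_and_set_min (m : List (List String)) : Bool :=
  if decide (PySem.List.len m = 9) && (m.map (fun row => decide (PySem.List.len row = 9))).all id then
    let seen : List SKey :=
      (PySem.List.enumerate m).flatMap (fun p =>
        (PySem.List.enumerate p.2).flatMap (fun q =>
          if 49 ≤ pyOrd q.2 ∧ pyOrd q.2 ≤ 57 then
            [SKey.rv q.2 p.1, SKey.cv q.1 q.2,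
             SKey.bx (PySem.Int.floordiv p.1 3) (PySem.Int.floordiv q.1 3) q.2]
          else []))
    decide (PySem.List.len seen = PySem.Set.len (PySem.Set.ofList seen))
  else false

-- ===== PORT B =====
-- B's inner conflict test: same value and same row, column or 3x3 box.
def cellConflict (x y : Int × Int × String) : Bool :=
  x.2.2 == y.2.2 && (x.1 == y.1 || x.2.1 == y.2.1 ||
    (PySem.Int.floordiv x.1 3 == PySem.Int.floordiv y.1 3 &&
     PySem.Int.floordiv x.2.1 3 == PySem.Int.floordiv y.2.1 3))

-- B's double loop: head cell against the rest (cells[i+1:]), then recurse; ok-flag fold.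
def pairsScan : List (Int × Int × String) → Bool → Bool
  | [], ok => ok
  | x :: xs, ok => pairsScan xs (xs.foldl (fun ok y => if cellConflict x y then false else ok) ok)

def is_partial_sudoku_valid_via_list_and_set_min_alt (m : List (List String)) : Bool :=
  if !(decide (PySem.List.len m = 9) && (m.map (fun row => decide (PySem.List.len row = 9))).all id) then
    false
  else
    let cells : List (Int × Int × String) :=
      (PySem.List.enumerate m).flatMap (fun p =>
        (PySem.List.enumerate p.2).flatMap (fun q =>
          if 49 ≤ pyOrd q.2 ∧ pyOrd q.2 ≤ 57 then [(p.1, q.1, q.2)] else []))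
    pairsScan cells true

-- ===== PRECONDITION & SPEC =====
-- Pre_ excludes exactly the inputs where Python's ord(val) raises TypeError: a 9x9 matrix
-- (only then does A reach ord) containing a string that is not a single character.
def Pre_is_partial_sudoku_valid_via_list_and_set_min (m : List (List String)) : Prop :=
  (m.length = 9 ∧ ∀ row ∈ m, row.length = 9) → ∀ row ∈ m, ∀ v ∈ row, v.toList.length = 1
instance (m : List (List String)) : Decidable (Pre_is_partial_sudoku_valid_via_list_and_set_min m) := by
  unfold Pre_is_partial_sudoku_valid_via_list_and_set_min; infer_instance

def pvWitness_is_partial_sudoku_valid_via_list_and_set_min : List (List String) :=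
  List.replicate 9 (List.replicate 9 "5")

def Spec_is_partial_sudoku_valid_via_list_and_set_min (m : List (List String)) (out : Bool) : Prop := out = is_partial_sudoku_valid_via_list_and_set_min_alt m
instance (m : List (List String)) (out : Bool) : Decidable (Spec_is_partial_sudoku_valid_via_list_and_set_min m out) := by unfold Spec_is_partial_sudoku_valid_via_list_and_set_min; infer_instance

-- ===== CLAIM (what is proved, stated in full; the proofs are below) =====
def Claim_equal_is_partial_sudoku_valid_via_list_and_set_min : Prop := ∀ (m : List (List String)), Dom_is_partial_sudoku_valid_via_list_and_set_min m → Pre_is_partial_sudoku_valid_via_list_and_set_min m → Spec_is_partial_sudoku_valid_via_list_and_set_min m (is_partial_sudoku_valid_via_list_and_set_min m)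

-- ===== LEMMAS AND PROOFS =====

-- the three keys A emits for one digit cell
def keys3 (x : Int × Int × String) : List SKey :=
  [SKey.rv x.2.2 x.1, SKey.cv x.2.1 x.2.2,
   SKey.bx (PySem.Int.floordiv x.1 3) (PySem.Int.floordiv x.2.1 3) x.2.2]

theorem ofList_sublist {α : Type} [BEq α] [LawfulBEq α] (xs : List α) :
    (PySem.Set.ofList xs).Sublist xs := by
  induction xs with
  | nil => simp [PySem.Set.ofList, PySem.Set.empty]
  | cons x xs ih =>
      rw [PySem.Set.ofList_cons]
      exact List.Sublist.cons₂ x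
        ((show ((PySem.Set.ofList xs).discard x).Sublist (PySem.Set.ofList xs) from
          List.filter_sublist).trans ih)

theorem len_ofList_eq_iff_nodup {α : Type} [BEq α] [LawfulBEq α] (xs : List α) :
    (PySem.Set.ofList xs).length = xs.length ↔ xs.Nodup := by
  constructor
  · intro h
    have := (ofList_sublist xs).eq_of_length h
    rw [← this]; exact PySem.Set.nodup_ofList xs
  · intro h; rw [PySem.Set.ofList_eq_self_of_nodup xs h]

theorem flatMap_flatMap' {α β γ : Type} (l : List α) (g : α → List β) (f : β → List γ) :
    (l.flatMap g).flatMap f = l.flatMap (fun x => (g x).flatMap f) := by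
  induction l with
  | nil => simp
  | cons a as ih => simp [List.flatMap_cons, List.flatMap_append, ih]

-- A's seen list is keys3 mapped over B's digit-cell list
theorem seen_eq_flatMap_keys3 (m : List (List String)) :
    (PySem.List.enumerate m).flatMap (fun p =>
        (PySem.List.enumerate p.2).flatMap (fun q =>
          if 49 ≤ pyOrd q.2 ∧ pyOrd q.2 ≤ 57 then
            [SKey.rv q.2 p.1, SKey.cv q.1 q.2,
             SKey.bx (PySem.Int.floordiv p.1 3) (PySem.Int.floordiv q.1 3) q.2]
          else []))
    = ((PySem.List.enumerate m).flatMap (fun p =>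
        (PySem.List.enumerate p.2).flatMap (fun q =>
          if 49 ≤ pyOrd q.2 ∧ pyOrd q.2 ≤ 57 then [(p.1, q.1, q.2)] else []))).flatMap keys3 := by
  rw [flatMap_flatMap']
  apply List.flatMap_congr
  intro p _
  rw [flatMap_flatMap']
  apply List.flatMap_congr
  intro q _
  by_cases h : 49 ≤ pyOrd q.2 ∧ pyOrd q.2 ≤ 57 <;> simp [h, keys3]

theorem disjoint_keys3_iff (x y : Int × Int × String) :
    List.Disjoint (keys3 x) (keys3 y) ↔ cellConflict x y = false := by
  obtain ⟨r1, c1, v1⟩ := x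
  obtain ⟨r2, c2, v2⟩ := y
  simp [keys3, cellConflict, List.Disjoint, not_or, SKey.rv.injEq, SKey.cv.injEq, SKey.bx.injEq]
  tauto

theorem nodup_flatMap_keys3 (cells : List (Int × Int × String)) :
    (cells.flatMap keys3).Nodup ↔ cells.Pairwise (fun x y => cellConflict x y = false) := by
  rw [List.nodup_flatMap]
  constructor
  · intro h
    exact h.2.imp (fun hd => (disjoint_keys3_iff _ _).mp hd)
  · intro h
    exact ⟨fun x _ => by simp [keys3], h.imp (fun hc => (disjoint_keys3_iff _ _).mpr hc)⟩

theorem foldl_conflict (x : Int × Int × String) (xs : List (Int × Int × String)) (b : Bool) :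
    xs.foldl (fun ok y => if cellConflict x y then false else ok) b
      = (b && xs.all (fun y => !cellConflict x y)) := by
  induction xs generalizing b with
  | nil => simp
  | cons z zs ih =>
      simp only [List.foldl_cons, List.all_cons, ih]
      by_cases h : cellConflict x z = true <;> simp [h]

theorem pairsScan_eq (l : List (Int × Int × String)) :
    ∀ b : Bool, pairsScan l b
      = (b && decide (l.Pairwise (fun x y => cellConflict x y = false))) := by
  induction l with
  | nil => intro b; simp [pairsScan]
  | cons x xs ih =>
      intro b
      rw [pairsScan, foldl_conflict, ih]
      have hd : decide ((x :: xs).Pairwise fun a b => cellConflict a b = false)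
          = ((xs.all fun y => !cellConflict x y)
              && decide (xs.Pairwise fun a b => cellConflict a b = false)) := by
        rw [Bool.eq_iff_iff]
        simp [List.pairwise_cons, List.all_eq_true]
      rw [hd, ← Bool.and_assoc]

-- ===== VERDICT (by name: the statement is the Claim_ definition above) =====
theorem is_partial_sudoku_valid_via_list_and_set_min_spec : Claim_equal_is_partial_sudoku_valid_via_list_and_set_min := by
  intro m _ _
  unfold Spec_is_partial_sudoku_valid_via_list_and_set_min
  unfold is_partial_sudoku_valid_via_list_and_set_min is_partial_sudoku_valid_via_list_and_set_min_alt
  by_cases hg : (decide (PySem.List.len m = 9)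
      && (m.map (fun row => decide (PySem.List.len row = 9))).all id) = true
  · rw [if_pos hg, if_neg (by rw [hg]; simp)]
    rw [seen_eq_flatMap_keys3, pairsScan_eq _ true, Bool.true_and, Bool.eq_iff_iff]
    simp only [decide_eq_true_eq, PySem.List.len, PySem.Set.len, Nat.cast_inj]
    rw [eq_comm, len_ofList_eq_iff_nodup, nodup_flatMap_keys3]
  · rw [Bool.not_eq_true] at hg
    rw [if_neg (by rw [hg]; simp), if_pos (by rw [hg]; rfl)]
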